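-- pv_equiv track=rewrite | github.com/athanasioy/pokerCalc | legacy/poker_logic.py | getDups
-- ===== SOURCE A (Python) =====
-- def getDups(list):
--     """from a list of numbers, getDups returns
--     a dictionary with the number as the key and
--     the number of occurances as the number.
--     Example: list = [1,1,5,6,'Q','Q']. getDups(list) --> {'1':2,'Q':2}"""
--     seen_l = []
--     dups = []
--     for x in list:
--         if x[:-1] not in excludeSuitlist(seen_l):
--             seen_l.append(x)
--         else:
--             dups.append(x)
--     return dups
--
-- def excludeSuitlist(l):
--     return [x[:-1] for x in l]
-- ===== SOURCE B (Python) =====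
-- def getDups(list):
--     cnt = {}
--     for x in list:
--         cnt[x[:-1]] = cnt.get(x[:-1], 0) + 1
--     out = []
--     for x in reversed(list):
--         k = x[:-1]
--         if cnt[k] > 1:
--             out.append(x)
--         cnt[k] -= 1
--     out.reverse()
--     return out
-- ===== Notes on version B (the rewrite author's own statement) =====
-- stated objective: faster
-- what changed: A does one fused scan re-mapping the whole seen-list on every element; B is count-then-backward-sweep: a first pass counts each prefix x[:-1], then a reverse pass decrements the running count and emits x (building the output back-to-front) exactly when occurrences at or before x number at least two.
import Mathlib
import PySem

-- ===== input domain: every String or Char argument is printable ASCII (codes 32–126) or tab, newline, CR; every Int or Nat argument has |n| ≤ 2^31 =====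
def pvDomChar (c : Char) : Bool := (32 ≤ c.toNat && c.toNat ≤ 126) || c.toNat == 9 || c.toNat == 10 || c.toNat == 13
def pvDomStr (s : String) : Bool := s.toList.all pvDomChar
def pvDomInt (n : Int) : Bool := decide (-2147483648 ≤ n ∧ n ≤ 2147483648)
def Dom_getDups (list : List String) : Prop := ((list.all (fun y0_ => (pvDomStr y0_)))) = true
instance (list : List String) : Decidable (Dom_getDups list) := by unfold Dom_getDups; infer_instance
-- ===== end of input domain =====

-- B replaces A's fused scan (which re-maps the whole seen-list per element) by a counting
-- pass over the prefixes followed by a backward sweep with decrementing counts; faster (O(n) vs O(n^2)).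

-- x[:-1] (shared by both ports)
def pvPref (x : String) : String := PySem.Str.slice x none (some (-1))

-- ===== PORT A =====
def excludeSuitlist (l : List String) : List String := l.map (fun x => pvPref x)

def getDups (list : List String) : List String :=
  (list.foldl (fun (st : List String × List String) x =>
      if pvPref x ∉ excludeSuitlist st.1 then (st.1 ++ [x], st.2)
      else (st.1, st.2 ++ [x])) ([], [])).2

-- ===== PORT B =====
-- Python's cnt[k] indexing is ported as getD _ 0: the key is always present (counted in pass 1),
-- so the KeyError branch is unreachable and getD is exact here.
def getDups_alt (list : List String) : List String :=
  let cnt := list.foldl (fun d x => d.insert (pvPref x) (d.getD (pvPref x) 0 + 1))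
      (PySem.Dict.empty : PySem.Dict String Int)
  ((list.reverse.foldl (fun (st : PySem.Dict String Int × List String) x =>
      let k := pvPref x
      let out := if st.1.getD k 0 > 1 then st.2 ++ [x] else st.2
      (st.1.insert k (st.1.getD k 0 - 1), out)) (cnt, ([] : List String))).2).reverse

-- ===== PRECONDITION & SPEC =====
def Spec_getDups (list : List String) (out : List String) : Prop := out = getDups_alt list
instance (list : List String) (out : List String) : Decidable (Spec_getDups list out) := by unfold Spec_getDups; infer_instance

-- ===== CLAIM (what is proved, stated in full; the proofs are below) =====
def Claim_equal_getDups : Prop := ∀ (list : List String), Dom_getDups list → Spec_getDups list (getDups list)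

-- ===== LEMMAS AND PROOFS =====

-- reference recursion for A: output x when its prefix was already seen, else record the prefix
def goA (ps : List String) : List String → List String
  | [] => []
  | x :: xs => if pvPref x ∈ ps then x :: goA ps xs else goA (ps ++ [pvPref x]) xs

-- reference recursion carrying the processed ELEMENTS as context
def dupsCtx (a : List String) : List String → List String
  | [] => []
  | x :: xs => if pvPref x ∈ a.map pvPref then x :: dupsCtx (a ++ [x]) xs
               else dupsCtx (a ++ [x]) xs

theorem getDups_eq_goA_aux (l : List String) : ∀ (seen dups : List String),
    (l.foldl (fun (st : List String × List String) x =>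
        if pvPref x ∉ excludeSuitlist st.1 then (st.1 ++ [x], st.2)
        else (st.1, st.2 ++ [x])) (seen, dups)).2
      = dups ++ goA (excludeSuitlist seen) l := by
  induction l with
  | nil => intro seen dups; simp [goA]
  | cons x xs ih =>
    intro seen dups
    by_cases hx : pvPref x ∈ excludeSuitlist seen
    · simp only [List.foldl_cons, if_neg (not_not_intro hx)]
      rw [ih, goA, if_pos hx]
      simp
    · simp only [List.foldl_cons, if_pos hx]
      rw [ih, goA, if_neg hx]
      congr 1
      simp [excludeSuitlist]

theorem getDups_eq_goA (l : List String) : getDups l = goA [] l := by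
  have := getDups_eq_goA_aux l [] []
  simpa [getDups, excludeSuitlist] using this

theorem goA_eq_dupsCtx (l : List String) : ∀ (ps a : List String),
    (∀ k, k ∈ ps ↔ k ∈ a.map pvPref) → goA ps l = dupsCtx a l := by
  induction l with
  | nil => intro ps a _; rfl
  | cons x xs ih =>
    intro ps a h
    by_cases hx : pvPref x ∈ a.map pvPref
    · rw [goA, if_pos ((h _).2 hx), dupsCtx, if_pos hx]
      congr 1
      refine ih ps (a ++ [x]) ?_
      intro k
      simp only [List.map_append, List.map_cons, List.map_nil, List.mem_append,
        List.mem_singleton]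
      constructor
      · intro hk; exact Or.inl ((h k).1 hk)
      · rintro (hk | rfl)
        · exact (h k).2 hk
        · exact (h _).2 hx
    · rw [goA, if_neg (fun c => hx ((h _).1 c)), dupsCtx, if_neg hx]
      exact ih _ _ (by intro k; simp [h k])

-- the backward sweep, written as the foldr that l.reverse.foldl is
theorem revLoop_eq (b : List String) : ∀ (a : List String) (d : PySem.Dict String Int),
    (∀ k, d.getD k 0 = (((a ++ b).map pvPref).count k : Int)) →
    (b.foldr (fun x (st : PySem.Dict String Int × List String) =>
        let k := pvPref x
        let out := if st.1.getD k 0 > 1 then st.2 ++ [x] else st.2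
        (st.1.insert k (st.1.getD k 0 - 1), out)) (d, ([] : List String))).2
      = (dupsCtx a b).reverse := by
  -- strengthen: also track the dict's lookups
  suffices h : ∀ (a : List String) (d : PySem.Dict String Int),
      (∀ k, d.getD k 0 = (((a ++ b).map pvPref).count k : Int)) →
      (b.foldr (fun x (st : PySem.Dict String Int × List String) =>
          let k := pvPref x
          let out := if st.1.getD k 0 > 1 then st.2 ++ [x] else st.2
          (st.1.insert k (st.1.getD k 0 - 1), out)) (d, ([] : List String))).2
        = (dupsCtx a b).reverse ∧
      (∀ k, (b.foldr (fun x (st : PySem.Dict String Int × List String) =>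
          let k := pvPref x
          let out := if st.1.getD k 0 > 1 then st.2 ++ [x] else st.2
          (st.1.insert k (st.1.getD k 0 - 1), out)) (d, ([] : List String))).1.getD k 0
        = ((a.map pvPref).count k : Int)) by
    intro a d hd; exact (h a d hd).1
  induction b with
  | nil =>
    intro a d hd
    refine ⟨rfl, fun k => ?_⟩
    simpa using hd k
  | cons x xs ih =>
    intro a d hd
    have hd' : ∀ k, d.getD k 0 = ((((a ++ [x]) ++ xs).map pvPref).count k : Int) := by
      intro k; rw [hd k]; congr 2; simp
    obtain ⟨hout, hcnt⟩ := ih (a ++ [x]) d hd'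
    have hcx : (xs.foldr (fun x (st : PySem.Dict String Int × List String) =>
        let k := pvPref x
        let out := if st.1.getD k 0 > 1 then st.2 ++ [x] else st.2
        (st.1.insert k (st.1.getD k 0 - 1), out)) (d, ([] : List String))).1.getD (pvPref x) 0
        = ((a.map pvPref).count (pvPref x) : Int) + 1 := by
      rw [hcnt (pvPref x)]
      simp [List.count_append]
    have hmem : ((xs.foldr (fun x (st : PySem.Dict String Int × List String) =>
        let k := pvPref x
        let out := if st.1.getD k 0 > 1 then st.2 ++ [x] else st.2
        (st.1.insert k (st.1.getD k 0 - 1), out)) (d, ([] : List String))).1.getD (pvPref x) 0 > 1)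
        ↔ pvPref x ∈ a.map pvPref := by
      rw [hcx]
      constructor
      · intro h
        have : 0 < (a.map pvPref).count (pvPref x) := by omega
        exact List.count_pos_iff.mp this
      · intro h
        have : 0 < (a.map pvPref).count (pvPref x) := List.count_pos_iff.mpr h
        omega
    constructor
    · show (if _ > 1 then _ ++ [x] else _) = (dupsCtx a (x :: xs)).reverse
      rw [dupsCtx]
      by_cases hx : pvPref x ∈ a.map pvPref
      · rw [if_pos (hmem.mpr hx), if_pos hx, hout]
        simp
      · rw [if_neg (fun c => hx (hmem.mp c)), if_neg hx, hout]
    · intro k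
      show (PySem.Dict.insert _ (pvPref x) _).getD k 0 = _
      rw [PySem.Dict.getD_insert]
      by_cases hk : k = pvPref x
      · rw [if_pos hk, hk, hcx]; omega
      · rw [if_neg hk, hcnt k]
        congr 1
        simp only [List.map_append, List.count_append, List.map_cons, List.map_nil]
        have : (pvPref x :: ([] : List String)).count k = 0 := by
          simp [Ne.symm hk]
        omega

theorem getDups_alt_eq_dupsCtx (l : List String) : getDups_alt l = dupsCtx [] l := by
  unfold getDups_alt
  dsimp only
  rw [List.foldl_reverse]
  have hcnt : ∀ k, (l.foldl (fun d x => d.insert (pvPref x) (d.getD (pvPref x) 0 + 1))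
      (PySem.Dict.empty : PySem.Dict String Int)).getD k 0
      = ((([] ++ l).map pvPref).count k : Int) := by
    intro k
    rw [← List.foldl_map (f := pvPref)
        (g := fun (d : PySem.Dict String Int) y => d.insert y (d.getD y 0 + 1)),
      PySem.Dict.getD_foldl_insert_add_one]
    simp
  rw [revLoop_eq l [] _ hcnt]
  simp

-- ===== VERDICT (by name: the statement is the Claim_ definition above) =====
theorem getDups_spec : Claim_equal_getDups := by
  intro l _
  unfold Spec_getDups
  rw [getDups_eq_goA, getDups_alt_eq_dupsCtx, goA_eq_dupsCtx l [] [] (by simp)]
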